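-- pv_equiv track=rewrite | github.com/Shinh0707/MinecraftController | Command/Hobby.py | distribute_evenly
-- ===== SOURCE A (Python) =====
-- from collections import Counter, defaultdict
--
-- def distribute_evenly(A):
--     # 要素の出現回数をカウント
--     count = Counter(A)
--
--     # 出現頻度でソート（降順）
--     sorted_elements = sorted(count.keys(), key=lambda x: count[x], reverse=True)
--
--     # 新しい配列を作成
--     result = []
--     indices = {elem: 0 for elem in sorted_elements}
--
--     while len(result) < len(A):
--         for elem in sorted_elements:
--             if indices[elem] < count[elem]:
--                 result.append(elem)
--                 indices[elem] += 1
--                 if len(result) == len(A):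
--                     break
--
--     return result
-- ===== SOURCE B (Python) =====
-- from collections import Counter
--
-- def distribute_evenly(A):
--     count = Counter(A)
--     order = sorted(count.keys(), key=lambda x: count[x], reverse=True)
--     # element-major: drop each element into buckets 0..count-1, then flatten
--     buckets = []
--     for e in order:
--         c = count[e]
--         while len(buckets) < c:
--             buckets.append([])
--         for r in range(c):
--             buckets[r].append(e)
--     return [x for b in buckets for x in b]
-- ===== Notes on version B (the rewrite author's own statement) =====
-- stated objective: alternative
-- what changed: replaces the round-major while-loop that rescans every distinct element (with an indices dict) once per round with a single element-major pass dropping each element into buckets 0..count-1 and flattening the buckets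
import Mathlib
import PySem

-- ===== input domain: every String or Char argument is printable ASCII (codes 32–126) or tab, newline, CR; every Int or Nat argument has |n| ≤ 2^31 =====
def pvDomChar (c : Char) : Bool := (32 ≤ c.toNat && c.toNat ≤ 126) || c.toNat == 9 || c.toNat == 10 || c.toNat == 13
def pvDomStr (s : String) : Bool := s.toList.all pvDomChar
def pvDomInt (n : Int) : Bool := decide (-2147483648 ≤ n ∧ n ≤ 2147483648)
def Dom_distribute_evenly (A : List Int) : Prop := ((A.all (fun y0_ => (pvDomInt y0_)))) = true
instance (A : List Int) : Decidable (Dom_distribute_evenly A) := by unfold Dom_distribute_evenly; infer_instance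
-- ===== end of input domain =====

-- B replaces A's round-major rescanning while-loop (indices dict, one scan per round) by a single element-major pass into buckets.

-- ===== PORT A =====
-- inner 'for elem in sorted_elements: …' with its break on len(result) == len(A)
def pvAFor (count : PySem.Dict Int Int) (lenA : Nat) :
    List Int → List Int × PySem.Dict Int Int → List Int × PySem.Dict Int Int
  | [], st => st
  | elem :: rest, (result, indices) =>
    if indices.getD elem 0 < count.getD elem 0 then
      if (result ++ [elem]).length = lenA then
        (result ++ [elem], indices.insert elem (indices.getD elem 0 + 1))
      else pvAFor count lenA rest (result ++ [elem], indices.insert elem (indices.getD elem 0 + 1))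
    else pvAFor count lenA rest (result, indices)

-- outer 'while len(result) < len(A)' (fuel bounds the passes; Python makes at most len(A) of them)
def pvAWhile (count : PySem.Dict Int Int) (sorted_elements : List Int) (lenA : Nat) :
    Nat → List Int × PySem.Dict Int Int → List Int × PySem.Dict Int Int
  | 0, st => st
  | fuel + 1, st =>
    if st.1.length < lenA then
      pvAWhile count sorted_elements lenA fuel (pvAFor count lenA sorted_elements st)
    else st

def distribute_evenly (A : List Int) : List Int :=
  let count := PySem.Dict.counter A
  let sorted_elements := PySem.List.sorted count.keys (fun x => count.getD x 0) true
  let indices := sorted_elements.foldl (fun d e => d.insert e (0 : Int)) PySem.Dict.empty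
  (pvAWhile count sorted_elements A.length (A.length + 1) ([], indices)).1

-- ===== PORT B =====
-- 'while len(buckets) < c: buckets.append([])'
def pvBGrow (buckets : List (List Int)) (c : Nat) : List (List Int) :=
  if buckets.length < c then pvBGrow (buckets ++ [[]]) c else buckets
termination_by c - buckets.length
decreasing_by simp; omega

-- 'for r in range(c): buckets[r].append(e)'
def pvBPlace : List (List Int) → Nat → Int → List (List Int)
  | bs, 0, _ => bs
  | [], _ + 1, _ => []
  | b :: bs, r + 1, e => (b ++ [e]) :: pvBPlace bs r e

def distribute_evenly_alt (A : List Int) : List Int :=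
  let count := PySem.Dict.counter A
  let order := PySem.List.sorted count.keys (fun x => count.getD x 0) true
  (order.foldl (fun buckets e =>
      let c := (count.getD e 0).toNat
      pvBPlace (pvBGrow buckets c) c e) []).flatten

-- ===== PRECONDITION & SPEC =====
def Spec_distribute_evenly (A : List Int) (out : List Int) : Prop := out = distribute_evenly_alt A
instance (A : List Int) (out : List Int) : Decidable (Spec_distribute_evenly A out) := by unfold Spec_distribute_evenly; infer_instance

-- ===== CLAIM (what is proved, stated in full; the proofs are below) =====
def Claim_equal_distribute_evenly : Prop := ∀ (A : List Int), Dom_distribute_evenly A → Spec_distribute_evenly A (distribute_evenly A)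

-- ===== LEMMAS AND PROOFS =====

-- common notation: S = the sorted distinct elements, c e = its count, m = the largest count
def pvS (A : List Int) : List Int :=
  PySem.List.sorted (PySem.Dict.counter A).keys (fun x => (PySem.Dict.counter A).getD x 0) true

def pvC (A : List Int) (e : Int) : Int := (PySem.Dict.counter A).getD e 0

def pvM (A : List Int) : Nat := ((pvS A).map (fun e => (pvC A e).toNat)).foldl max 0

-- round r of the distribution, and the first k rounds concatenated
def pvF (A : List Int) (r : Nat) : List Int :=
  (pvS A).filter (fun e => decide ((r : Int) < pvC A e))

def pvJ (A : List Int) (k : Nat) : List Int := (List.range k).flatMap (pvF A)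

theorem pvC_eq_count (A : List Int) (e : Int) : pvC A e = (A.count e : Int) := by
  simp [pvC, PySem.Dict.getD_counter]

theorem pvS_nodup (A : List Int) : (pvS A).Nodup := by
  have h := (PySem.List.sorted_perm (PySem.Dict.counter A).keys
      (fun x => (PySem.Dict.counter A).getD x 0) true)
  exact h.nodup_iff.mpr (by rw [PySem.Dict.keys_counter]; exact PySem.Set.nodup_ofList A)

theorem pvS_perm (A : List Int) : (pvS A).Perm (PySem.Set.ofList A) := by
  unfold pvS
  rw [PySem.Dict.keys_counter]
  exact PySem.List.sorted_perm _ _ _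

theorem pvJ_succ (A : List Int) (k : Nat) : pvJ A (k + 1) = pvJ A k ++ pvF A k := by
  simp [pvJ, List.range_succ]

theorem pvC_le_m (A : List Int) : ∀ e ∈ pvS A, (pvC A e).toNat ≤ pvM A := by
  intro e he
  exact (PySem.List.le_foldl_max ((pvS A).map (fun e => (pvC A e).toNat)) 0).2 _
    (List.mem_map_of_mem he)

theorem pvM_attained (A : List Int) (j : Nat) (hj : j < pvM A) :
    ∃ e ∈ pvS A, (j : Int) < pvC A e := by
  rcases PySem.List.foldl_max_mem ((pvS A).map (fun e => (pvC A e).toNat)) 0 with h | h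
  · exact absurd hj (by simp [pvM, h])
  · rcases List.mem_map.mp h with ⟨e, he, hce⟩
    refine ⟨e, he, ?_⟩
    have h2 : j < (pvC A e).toNat := by rw [hce]; exact hj
    omega

-- a round past an element list's largest count is empty (general list version)
theorem pv_filter_empty_ge (A Q : List Int) (r : Nat)
    (hr : (Q.map (fun e => (pvC A e).toNat)).foldl max 0 ≤ r) :
    Q.filter (fun e => decide ((r : Int) < pvC A e)) = [] := by
  rw [List.filter_eq_nil_iff]
  intro e he
  have h1 := (PySem.List.le_foldl_max (Q.map (fun e => (pvC A e).toNat)) 0).2 _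
    (List.mem_map_of_mem he)
  simp only [decide_eq_true_eq]
  omega

theorem pv_sum_min_succ (A : List Int) (k : Nat) :
    ∀ S : List Int, (S.map (fun e => min (k + 1) (pvC A e).toNat)).sum
      = (S.map (fun e => min k (pvC A e).toNat)).sum
        + S.countP (fun e => decide ((k : Int) < pvC A e)) := by
  intro S
  induction S with
  | nil => simp
  | cons e S ih =>
    simp only [List.map_cons, List.sum_cons, List.countP_cons, ih]
    by_cases h : (k : Int) < pvC A e
    · simp [h]
      omega
    · simp [h]
      omega

theorem pvJ_length (A : List Int) (k : Nat) :
    (pvJ A k).length = ((pvS A).map (fun e => min k (pvC A e).toNat)).sum := by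
  induction k with
  | zero =>
    simp [pvJ]
  | succ k ih =>
    rw [pvJ_succ, List.length_append, ih, pv_sum_min_succ]
    congr 1
    rw [pvF, ← List.countP_eq_length_filter]

theorem pvSum_counts (A : List Int) :
    ((pvS A).map (fun e => (pvC A e).toNat)).sum = A.length := by
  have hperm : (pvS A).Perm A.dedup :=
    (pvS_perm A).trans ((List.perm_ext_iff_of_nodup (PySem.Set.nodup_ofList A)
      (List.nodup_dedup A)).mpr (fun x => by simp [PySem.Set.mem_ofList]))
  have hsum := (hperm.map (fun e => (pvC A e).toNat)).sum_eq
  rw [hsum]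
  have hfun : (fun e => (pvC A e).toNat) = fun x => A.count x := by
    funext e; rw [pvC_eq_count]; simp
  rw [hfun]
  exact List.sum_map_count_dedup_eq_length A

theorem pvJ_m_length (A : List Int) : (pvJ A (pvM A)).length = A.length := by
  rw [pvJ_length]
  have h : ((pvS A).map (fun e => min (pvM A) (pvC A e).toNat))
      = (pvS A).map (fun e => (pvC A e).toNat) :=
    List.map_congr_left (fun e he => by have := pvC_le_m A e he; omega)
  rw [h, pvSum_counts]

theorem pvJ_le_length (A : List Int) (k : Nat) :
    (pvJ A k).length ≤ A.length := by
  rw [pvJ_length, ← pvSum_counts]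
  exact List.sum_le_sum (fun e _ => by omega)

theorem pvJ_lt_length (A : List Int) (j : Nat) (hj : j < pvM A) :
    (pvJ A j).length < A.length := by
  obtain ⟨e, he, hce⟩ := pvM_attained A j hj
  have hpos : 0 < (pvF A j).length := by
    rw [pvF, ← List.countP_eq_length_filter]
    exact List.countP_pos_iff.mpr ⟨e, he, by simpa⟩
  have h1 := pvJ_le_length A (j + 1)
  rw [pvJ_succ, List.length_append] at h1
  omega

-- the inner for-pass appends exactly round k and bumps the visited indices to min (k+1) c
theorem pvAFor_spec (count : PySem.Dict Int Int) (lenA : Nat) (k : Int) :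
    ∀ (rest result : List Int) (d : PySem.Dict Int Int),
    (∀ e ∈ rest, d.getD e 0 = min k (count.getD e 0)) →
    rest.Nodup →
    result.length + (rest.filter (fun e => decide (k < count.getD e 0))).length ≤ lenA →
    (pvAFor count lenA rest (result, d)).1
        = result ++ rest.filter (fun e => decide (k < count.getD e 0))
    ∧ (∀ e ∈ rest,
        (pvAFor count lenA rest (result, d)).2.getD e 0 = min (k + 1) (count.getD e 0))
    ∧ (∀ x, x ∉ rest →
        (pvAFor count lenA rest (result, d)).2.getD x 0 = d.getD x 0) := by
  intro rest
  induction rest with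
  | nil =>
    intro result d hd hnd hlen
    exact ⟨by simp [pvAFor], by simp, fun x _ => rfl⟩
  | cons e rest ih =>
    intro result d hd hnd hlen
    have hde : d.getD e 0 = min k (count.getD e 0) := hd e (List.mem_cons_self)
    have hnd' := List.nodup_cons.mp hnd
    simp only [pvAFor]
    by_cases hlt : k < count.getD e 0
    · have hcond : d.getD e 0 < count.getD e 0 := by omega
      rw [if_pos hcond]
      have hfe : (e :: rest).filter (fun e => decide (k < count.getD e 0))
          = e :: rest.filter (fun e => decide (k < count.getD e 0)) := by
        simp [hlt]
      by_cases hbr : (result ++ [e]).length = lenA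
      · rw [if_pos hbr]
        have hlen1 : result.length + 1
            + (rest.filter (fun e => decide (k < count.getD e 0))).length ≤ lenA := by
          rw [hfe] at hlen; simp only [List.length_cons] at hlen; omega
        have hap : (result ++ [e]).length = result.length + 1 := by simp
        have hfil : rest.filter (fun e => decide (k < count.getD e 0)) = [] :=
          List.eq_nil_of_length_eq_zero (by omega)
        refine ⟨by simp [hfe, hfil], ?_, ?_⟩
        · intro e' he'
          rcases List.mem_cons.mp he' with rfl | hmem
          · rw [PySem.Dict.getD_insert, if_pos rfl, hde]; omega
          · have hne : e' ≠ e := fun h => hnd'.1 (h ▸ hmem)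
            rw [PySem.Dict.getD_insert, if_neg hne, hd e' (List.mem_cons_of_mem _ hmem)]
            have hnot : ¬ (k < count.getD e' 0) := by
              intro hk
              have : e' ∈ rest.filter (fun e => decide (k < count.getD e 0)) :=
                List.mem_filter.mpr ⟨hmem, by simpa⟩
              rw [hfil] at this
              exact absurd this (List.not_mem_nil)
            omega
        · intro x hx
          have hxe : x ≠ e := fun h => hx (h ▸ List.mem_cons_self)
          rw [PySem.Dict.getD_insert, if_neg hxe]
      · rw [if_neg hbr]
        have hd2 : ∀ e' ∈ rest, (d.insert e (d.getD e 0 + 1)).getD e' 0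
            = min k (count.getD e' 0) := by
          intro e' he'
          have hne : e' ≠ e := fun h => hnd'.1 (h ▸ he')
          rw [PySem.Dict.getD_insert, if_neg hne]
          exact hd e' (List.mem_cons_of_mem _ he')
        have hlen2 : (result ++ [e]).length
            + (rest.filter (fun e => decide (k < count.getD e 0))).length ≤ lenA := by
          rw [hfe] at hlen; simp at hlen ⊢; omega
        obtain ⟨h1, h2, h3⟩ := ih (result ++ [e]) (d.insert e (d.getD e 0 + 1)) hd2 hnd'.2 hlen2
        refine ⟨by rw [h1, hfe]; simp, ?_, ?_⟩
        · intro e' he'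
          rcases List.mem_cons.mp he' with rfl | hmem
          · rw [h3 e' hnd'.1, PySem.Dict.getD_insert, if_pos rfl, hde]; omega
          · exact h2 e' hmem
        · intro x hx
          rw [List.mem_cons] at hx
          rw [h3 x (fun h => hx (Or.inr h)), PySem.Dict.getD_insert,
            if_neg (fun h => hx (Or.inl h))]
    · have hcond : ¬ d.getD e 0 < count.getD e 0 := by omega
      rw [if_neg hcond]
      have hfe : (e :: rest).filter (fun e => decide (k < count.getD e 0))
          = rest.filter (fun e => decide (k < count.getD e 0)) := by
        simp [hlt]
      have hlen2 : result.length
          + (rest.filter (fun e => decide (k < count.getD e 0))).length ≤ lenA := by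
        rw [hfe] at hlen; exact hlen
      obtain ⟨h1, h2, h3⟩ := ih result d (fun e' he' => hd e' (List.mem_cons_of_mem _ he'))
        hnd'.2 hlen2
      refine ⟨by rw [h1, hfe], ?_, ?_⟩
      · intro e' he'
        rcases List.mem_cons.mp he' with rfl | hmem
        · rw [h3 e' hnd'.1, hde]; omega
        · exact h2 e' hmem
      · intro x hx
        rw [List.mem_cons] at hx
        exact h3 x (fun h => hx (Or.inr h))

theorem pvAWhile_spec (A : List Int) :
    ∀ (fuel j : Nat) (d : PySem.Dict Int Int),
    j ≤ pvM A → pvM A ≤ j + fuel →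
    (∀ e ∈ pvS A, d.getD e 0 = min (j : Int) (pvC A e)) →
    (pvAWhile (PySem.Dict.counter A) (pvS A) A.length fuel (pvJ A j, d)).1 = pvJ A (pvM A) := by
  intro fuel
  induction fuel with
  | zero =>
    intro j d hjm hfuel hd
    have hj : j = pvM A := by omega
    simp [pvAWhile, hj]
  | succ fuel ih =>
    intro j d hjm hfuel hd
    simp only [pvAWhile]
    by_cases hc : (pvJ A j).length < A.length
    · rw [if_pos hc]
      have hjlt : j < pvM A := by
        rcases Nat.lt_or_ge j (pvM A) with h | h
        · exact h
        · have hj : j = pvM A := by omega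
          rw [hj, pvJ_m_length] at hc
          omega
      have hlen : (pvJ A j).length
          + ((pvS A).filter (fun e => decide ((j : Int) < pvC A e))).length ≤ A.length := by
        have h1 := pvJ_le_length A (j + 1)
        rw [pvJ_succ, List.length_append] at h1
        exact h1
      obtain ⟨h1, h2, _⟩ := pvAFor_spec (PySem.Dict.counter A) A.length (j : Int) (pvS A)
        (pvJ A j) d hd (pvS_nodup A) hlen
      have hpair : pvAFor (PySem.Dict.counter A) A.length (pvS A) (pvJ A j, d)
          = (pvJ A (j + 1), (pvAFor (PySem.Dict.counter A) A.length (pvS A) (pvJ A j, d)).2) := by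
        refine Prod.ext ?_ rfl
        rw [h1]
        simp [pvJ_succ, pvF, pvC]
      rw [hpair]
      refine ih (j + 1) _ hjlt (by omega) ?_
      intro e he
      have h4 := h2 e he
      have h5 : pvC A e = (PySem.Dict.counter A).getD e 0 := rfl
      rw [h5]
      push_cast
      exact h4
    · rw [if_neg hc]
      have hj : j = pvM A := by
        rcases Nat.lt_or_ge j (pvM A) with h | h
        · exact absurd (pvJ_lt_length A j h) hc
        · omega
      rw [hj]

theorem pvInit_zero :
    ∀ (S : List Int) (d : PySem.Dict Int Int), (∀ x, d.getD x (0 : Int) = 0) →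
    ∀ x, (S.foldl (fun d e => d.insert e (0 : Int)) d).getD x 0 = 0 := by
  intro S
  induction S with
  | nil => intro d hd x; exact hd x
  | cons e S ih =>
    intro d hd x
    refine ih _ (fun y => ?_) x
    rw [PySem.Dict.getD_insert]
    split <;> simp [hd]

theorem pvM_le_length (A : List Int) : pvM A ≤ A.length := by
  rcases PySem.List.foldl_max_mem ((pvS A).map (fun e => (pvC A e).toNat)) 0 with h | h
  · simp [pvM, h]
  · rcases List.mem_map.mp h with ⟨e, _, hce⟩
    have h1 : (pvC A e).toNat = A.count e := by rw [pvC_eq_count]; simp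
    have h2 : A.count e ≤ A.length := List.count_le_length
    unfold pvM
    omega

theorem portA_eq_J (A : List Int) : distribute_evenly A = pvJ A (pvM A) := by
  show (pvAWhile (PySem.Dict.counter A) (pvS A) A.length (A.length + 1)
      ([], (pvS A).foldl (fun d e => d.insert e (0 : Int)) PySem.Dict.empty)).1
    = pvJ A (pvM A)
  have h0 : pvJ A 0 = ([] : List Int) := by simp [pvJ]
  rw [← h0]
  refine pvAWhile_spec A (A.length + 1) 0 _ (Nat.zero_le _)
    (by have := pvM_le_length A; omega) ?_
  intro e _
  rw [pvInit_zero (pvS A) PySem.Dict.empty (fun x => by simp [PySem.Dict.getD_empty])]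
  have : (0 : Int) ≤ pvC A e := by rw [pvC_eq_count]; positivity
  omega

-- B side: the bucket state after processing Q is one list per round, holding round r of Q
def pvBK (A Q : List Int) : List (List Int) :=
  (List.range ((Q.map (fun e => (pvC A e).toNat)).foldl max 0)).map
    (fun (r : Nat) => Q.filter (fun e => decide ((r : Int) < pvC A e)))

theorem pvBGrow_eq (bs : List (List Int)) (c : Nat) :
    pvBGrow bs c = bs ++ List.replicate (c - bs.length) [] := by
  generalize hk : c - bs.length = n
  induction n generalizing bs with
  | zero =>
    rw [pvBGrow, if_neg (by omega)]
    simp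
  | succ n ih =>
    rw [pvBGrow, if_pos (by omega), ih (bs ++ [[]]) (by simp; omega), List.append_assoc]
    simp [List.replicate_succ]

theorem pvBPlace_range (e : Int) :
    ∀ (m : Nat) (g : Nat → List Int) (c : Nat), c ≤ m →
    pvBPlace ((List.range m).map g) c e
      = (List.range m).map (fun r => if r < c then g r ++ [e] else g r) := by
  intro m
  induction m with
  | zero => intro g c hc; rw [Nat.le_zero.mp hc]; simp [pvBPlace]
  | succ m ih =>
    intro g c hc
    cases c with
    | zero => simp [pvBPlace]
    | succ c =>
      rw [List.range_succ_eq_map, List.map_cons, List.map_map, List.map_cons, List.map_map]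
      simp only [pvBPlace]
      rw [ih (g ∘ Nat.succ) c (by omega)]
      have hhead : (if 0 < c + 1 then g 0 ++ [e] else g 0) = g 0 ++ [e] := by simp
      rw [hhead]
      congr 1
      apply List.map_congr_left
      intro i _
      by_cases h : i < c <;> simp [Function.comp, h]

-- padding a bucket list whose missing rounds are empty
theorem pv_range_map_pad (g : Nat → List Int) (m M : Nat) (hm : m ≤ M)
    (hg : ∀ r, m ≤ r → g r = []) :
    (List.range m).map g ++ List.replicate (M - m) [] = (List.range M).map g := by
  have h2 : m + (M - m) = M := by omega
  have h1 : List.range (m + (M - m)) = List.range m ++ (List.range (M - m)).map (m + ·) :=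
    List.range_add
  rw [h2] at h1
  rw [h1, List.map_append, List.map_map]
  congr 1
  refine (List.eq_replicate_iff.mpr ⟨by simp, ?_⟩).symm
  intro b hb
  rcases List.mem_map.mp hb with ⟨i, _, rfl⟩
  exact hg _ (by simp)

theorem pvBK_step (A Q : List Int) (e : Int) :
    pvBPlace (pvBGrow (pvBK A Q) (pvC A e).toNat) (pvC A e).toNat e = pvBK A (Q ++ [e]) := by
  have hM : ((Q ++ [e]).map (fun e => (pvC A e).toNat)).foldl max 0
      = max ((Q.map (fun e => (pvC A e).toNat)).foldl max 0) (pvC A e).toNat := by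
    rw [List.map_append, List.foldl_append]
    simp
  unfold pvBK
  rw [hM, pvBGrow_eq, List.length_map, List.length_range]
  rw [show (pvC A e).toNat - (Q.map (fun e => (pvC A e).toNat)).foldl max 0
      = max ((Q.map (fun e => (pvC A e).toNat)).foldl max 0) (pvC A e).toNat
        - (Q.map (fun e => (pvC A e).toNat)).foldl max 0 from by omega]
  rw [pv_range_map_pad _ _ _ (le_max_left _ _) (fun r hr => pv_filter_empty_ge A Q r hr)]
  rw [pvBPlace_range e _ _ _ (le_max_right _ _)]
  apply List.map_congr_left
  intro r _
  rw [List.filter_append]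
  by_cases h : r < (pvC A e).toNat
  · rw [if_pos h]
    have h2 : (r : Int) < pvC A e := by omega
    simp [h2]
  · rw [if_neg h]
    have h2 : ¬ ((r : Int) < pvC A e) := by omega
    simp [h2]

theorem pvBK_fold (A : List Int) :
    ∀ (P Q : List Int),
    P.foldl (fun buckets e =>
        pvBPlace (pvBGrow buckets (pvC A e).toNat) (pvC A e).toNat e) (pvBK A Q)
      = pvBK A (Q ++ P) := by
  intro P
  induction P with
  | nil => intro Q; simp
  | cons e P ih =>
    intro Q
    have h1 : Q ++ e :: P = (Q ++ [e]) ++ P := by simp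
    rw [List.foldl_cons, pvBK_step, h1, ih]

theorem portB_eq_J (A : List Int) : distribute_evenly_alt A = pvJ A (pvM A) := by
  have h0 : pvBK A ([] : List Int) = [] := by simp [pvBK]
  show ((pvS A).foldl (fun buckets e =>
      pvBPlace (pvBGrow buckets (pvC A e).toNat) (pvC A e).toNat e) []).flatten
    = pvJ A (pvM A)
  rw [← h0, pvBK_fold A (pvS A) []]
  simp only [List.nil_append]
  show ((List.range (pvM A)).map (pvF A)).flatten = ((List.range (pvM A)).flatMap (pvF A))
  rw [List.flatMap_def]

-- ===== VERDICT (by name: the statement is the Claim_ definition above) =====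
theorem distribute_evenly_spec : Claim_equal_distribute_evenly := by
  intro A _
  unfold Spec_distribute_evenly
  rw [portA_eq_J, portB_eq_J]
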